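-- pv_equiv track=rewrite | github.com/ianlkl11234s/gis-data-collectors | tasks/mini_taipei_publish.py | build_track_index
-- ===== SOURCE A (Python) =====
-- from collections import defaultdict
-- from typing import Dict, List, Optional, Tuple
--
-- def build_track_index(od_progress: Dict) -> Dict[Tuple[str, str], List[str]]:
--     index = defaultdict(list)
--     for track_id, stations in od_progress.items():
--         if len(stations) < 2:
--             continue
--         sorted_stations = sorted(stations.items(), key=lambda x: x[1])
--         origin = sorted_stations[0][0]
--         destination = sorted_stations[-1][0]
--         index[(origin, destination)].append(track_id)
--     return dict(index)
-- ===== SOURCE B (Python) =====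
-- def build_track_index(od_progress):
--     index = {}
--     for track_id, stations in od_progress.items():
--         if len(stations) < 2:
--             continue
--         items = iter(stations.items())
--         omin = dmax = next(items)
--         for pair in items:
--             if pair[1] < omin[1]:
--                 omin = pair
--             if dmax[1] <= pair[1]:
--                 dmax = pair
--         index.setdefault((omin[0], dmax[0]), []).append(track_id)
--     return index
-- ===== Notes on version B (the rewrite author's own statement) =====
-- stated objective: alternative
-- what changed: Instead of sorting each track's stations by value and taking the first/last element, B finds the origin (first station with minimal value) and destination (last station with maximal value) in a single linear pass, and builds the result with a plain dict+setdefault instead of a defaultdict.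
import Mathlib
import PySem

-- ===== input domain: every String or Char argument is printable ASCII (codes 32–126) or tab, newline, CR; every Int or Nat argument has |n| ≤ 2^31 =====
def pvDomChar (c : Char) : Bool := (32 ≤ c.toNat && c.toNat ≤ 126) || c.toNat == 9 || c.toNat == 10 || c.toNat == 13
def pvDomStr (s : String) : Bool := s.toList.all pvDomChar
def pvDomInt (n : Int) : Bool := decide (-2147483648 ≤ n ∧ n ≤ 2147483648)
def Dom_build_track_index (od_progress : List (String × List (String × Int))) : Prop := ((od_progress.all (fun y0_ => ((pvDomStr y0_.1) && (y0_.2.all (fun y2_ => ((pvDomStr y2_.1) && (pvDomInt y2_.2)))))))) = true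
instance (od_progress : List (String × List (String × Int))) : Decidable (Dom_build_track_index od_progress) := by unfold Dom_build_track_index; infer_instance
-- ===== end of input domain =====

-- B replaces the per-track sort by a single linear min/max pass over the stations.

-- ===== PORT A =====
def build_track_index (od_progress : List (String × List (String × Int))) : List (String × String × List String) :=
  let index := (PySem.Dict.ofList od_progress).items.foldl
    (fun (index : PySem.Dict (String × String) (List String)) td =>
      let stations := (PySem.Dict.ofList td.2).items
      if stations.length < 2 then index
      else
        let sorted_stations := PySem.List.sorted stations (fun x => x.2)
        -- indices 0 and -1 are always in range here: the guard makes sorted_stations nonempty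
        let origin := (PySem.List.pyGetD sorted_stations 0 ("", 0)).1
        let destination := (PySem.List.pyGetD sorted_stations (-1) ("", 0)).1
        index.modify (origin, destination) [] (fun l => l ++ [td.1]))
    PySem.Dict.empty
  index.items.map (fun q => (q.1.1, q.1.2, q.2))

-- ===== PORT B =====
def build_track_index_alt (od_progress : List (String × List (String × Int))) : List (String × String × List String) :=
  let index := (PySem.Dict.ofList od_progress).items.foldl
    (fun (index : PySem.Dict (String × String) (List String)) td =>
      match (PySem.Dict.ofList td.2).items with
      | [] => index
      | first :: rest =>
        if rest.isEmpty then index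
        else
          let md := rest.foldl
            (fun (s : (String × Int) × (String × Int)) pair =>
              ((if pair.2 < s.1.2 then pair else s.1),
               (if s.2.2 ≤ pair.2 then pair else s.2)))
            (first, first)
          index.modify (md.1.1, md.2.1) [] (fun l => l ++ [td.1]))
    PySem.Dict.empty
  index.items.map (fun q => (q.1.1, q.1.2, q.2))

-- ===== PRECONDITION & SPEC =====
def Spec_build_track_index (od_progress : List (String × List (String × Int))) (out : List (String × String × List String)) : Prop := out = build_track_index_alt od_progress
instance (od_progress : List (String × List (String × Int))) (out : List (String × String × List String)) : Decidable (Spec_build_track_index od_progress out) := by unfold Spec_build_track_index; infer_instance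

-- ===== CLAIM (what is proved, stated in full; the proofs are below) =====
def Claim_equal_build_track_index : Prop := ∀ (od_progress : List (String × List (String × Int))), Dom_build_track_index od_progress → Spec_build_track_index od_progress (build_track_index od_progress)

-- ===== LEMMAS AND PROOFS =====

-- B's running "first minimum" / "last maximum" folds
def pvMinP (t : List (String × Int)) (a : String × Int) : String × Int :=
  t.foldl (fun m x => if x.2 < m.2 then x else m) a

def pvMaxP (t : List (String × Int)) (a : String × Int) : String × Int :=
  t.foldl (fun m x => if m.2 ≤ x.2 then x else m) a

-- one unfolding step of PySem's insertion
lemma pv_insertBy_cons (bef : (String × Int) → (String × Int) → Bool) (x y : String × Int)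
    (s : List (String × Int)) :
    PySem.List.insertBy bef x (y :: s)
      = if bef x y then x :: y :: s else y :: PySem.List.insertBy bef x s := by
  simp [PySem.List.insertBy]

-- inserting into a value-sorted list: the last element becomes x exactly when x's value is ≥ the old last
lemma pv_getLast?_insertBy (x : String × Int) :
    ∀ (s : List (String × Int)) (m : String × Int),
      s.getLast? = some m → s.Pairwise (fun a b => a.2 ≤ b.2) →
      (PySem.List.insertBy (fun a b => decide (a.2 < b.2)) x s).getLast?
        = some (if m.2 ≤ x.2 then x else m) := by
  intro s
  induction s with
  | nil => intro m hm _; simp at hm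
  | cons y s ih =>
    intro m hm hp
    cases s with
    | nil =>
      simp at hm; subst hm
      rw [pv_insertBy_cons]
      by_cases hxy : x.2 < y.2
      · have h2 : ¬ y.2 ≤ x.2 := by omega
        simp [hxy, h2]
      · have h2 : y.2 ≤ x.2 := by omega
        simp [hxy, h2, PySem.List.insertBy]
    | cons z r =>
      have hm' : (z :: r).getLast? = some m := by simpa using hm
      have hp' : (z :: r).Pairwise (fun a b => a.2 ≤ b.2) := (List.pairwise_cons.mp hp).2
      have hym : y.2 ≤ m.2 := by
        have hmem : m ∈ z :: r := List.mem_of_getLast? hm'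
        exact (List.pairwise_cons.mp hp).1 m hmem
      rw [pv_insertBy_cons]
      by_cases hxy : x.2 < y.2
      · have h2 : ¬ m.2 ≤ x.2 := by omega
        simp [hxy, h2, hm']
      · have htail := ih m hm' hp'
        obtain ⟨w, ws, hw⟩ : ∃ w ws,
            PySem.List.insertBy (fun a b => decide (a.2 < b.2)) x (z :: r) = w :: ws := by
          rw [pv_insertBy_cons]
          by_cases hxz : x.2 < z.2
          · exact ⟨x, z :: r, by simp [hxz]⟩
          · exact ⟨z, PySem.List.insertBy (fun a b => decide (a.2 < b.2)) x r, by simp [hxz]⟩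
        have hb : (decide (x.2 < y.2)) = false := by simpa using hxy
        simp only [hb, Bool.false_eq_true, if_false]
        rw [hw, List.getLast?_cons_cons, ← hw]
        exact htail

-- head and last of the value-sorted station list are B's two folds
lemma pv_sorted_char (a : String × Int) (t : List (String × Int)) :
    (PySem.List.sorted (a :: t) (fun x => x.2)).head? = some (pvMinP t a) ∧
    (PySem.List.sorted (a :: t) (fun x => x.2)).getLast? = some (pvMaxP t a) := by
  induction t using List.reverseRecOn with
  | nil =>
    simp [PySem.List.sorted, PySem.List.insertBy, pvMinP, pvMaxP]
  | append_singleton t x ih =>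
    have hsnoc : a :: (t ++ [x]) = (a :: t) ++ [x] := by simp
    have hfold : PySem.List.sorted (a :: (t ++ [x])) (fun p => p.2)
        = PySem.List.insertBy (fun p q => decide (p.2 < q.2)) x
            (PySem.List.sorted (a :: t) (fun p => p.2)) := by
      rw [hsnoc, PySem.List.sorted_eq_foldl_insertBy, List.foldl_append,
        ← PySem.List.sorted_eq_foldl_insertBy]
      simp
    obtain ⟨ihh, ihl⟩ := ih
    have hpw := PySem.List.sorted_pairwise (a :: t) (fun p : String × Int => p.2)
    obtain ⟨m, s', hs⟩ : ∃ m s', PySem.List.sorted (a :: t) (fun p : String × Int => p.2) = m :: s' := by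
      cases h : PySem.List.sorted (a :: t) (fun p : String × Int => p.2) with
      | nil => exact absurd h (by simp [PySem.List.sorted_eq_nil_iff])
      | cons m s' => exact ⟨m, s', rfl⟩
    have hm : m = pvMinP t a := by rw [hs] at ihh; simpa using ihh
    constructor
    · -- head
      have hstep : pvMinP (t ++ [x]) a = if x.2 < m.2 then x else m := by
        rw [hm]; simp [pvMinP, List.foldl_append]
      rw [hfold, hs, hstep, pv_insertBy_cons]
      by_cases hx : x.2 < m.2 <;> simp [hx]
    · -- last
      have hstep : pvMaxP (t ++ [x]) a = if (pvMaxP t a).2 ≤ x.2 then x else pvMaxP t a := by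
        simp [pvMaxP, List.foldl_append]
      rw [hfold, hstep, pv_getLast?_insertBy x _ (pvMaxP t a) ihl (by simpa using hpw)]

lemma pv_pyGetD_head (xs : List (String × Int)) (m : String × Int) (d : String × Int)
    (h : xs.head? = some m) : PySem.List.pyGetD xs 0 d = m := by
  cases xs with
  | nil => simp at h
  | cons y t =>
    simp at h
    simp [PySem.List.pyGetD, PySem.List.pyGet?, PySem.List.pyIdx?, h]

lemma pv_pyGetD_last (xs : List (String × Int)) (m : String × Int) (d : String × Int)
    (h : xs.getLast? = some m) : PySem.List.pyGetD xs (-1) d = m := by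
  have hne : xs ≠ [] := by intro hn; rw [hn] at h; simp at h
  have hl : 1 ≤ xs.length := List.length_pos_iff.mpr hne
  have hg := List.getElem?_eq_getElem (l := xs) (i := xs.length - 1) (by omega)
  have hlast : xs.getLast hne = m := by
    have he := List.getLast?_eq_some_getLast (l := xs) hne
    rw [he] at h; exact Option.some.inj h
  rw [← hlast]
  simp [PySem.List.pyGetD, PySem.List.pyGet?, PySem.List.pyIdx?, hl, List.getLast_eq_getElem, hg]

-- ===== VERDICT (by name: the statement is the Claim_ definition above) =====
theorem build_track_index_spec : Claim_equal_build_track_index := by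
  intro od _
  unfold Spec_build_track_index build_track_index build_track_index_alt
  refine congrArg _ (congrArg _ ?_)
  apply PySem.List.foldl_congr_mem
  intro acc td _
  cases hs : (PySem.Dict.ofList td.2).items with
  | nil => simp
  | cons first rest =>
    cases rest with
    | nil => simp
    | cons z r =>
      have hlen : ¬ ((first :: z :: r).length < 2) := by simp
      rw [if_neg hlen]
      simp only [List.isEmpty_cons, Bool.false_eq_true, if_false]
      rw [PySem.List.foldl_prod_mk (f := fun m (x : String × Int) => if x.2 < m.2 then x else m)
        (g := fun m (x : String × Int) => if m.2 ≤ x.2 then x else m)]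
      obtain ⟨hh, hl⟩ := pv_sorted_char first (z :: r)
      rw [pv_pyGetD_head _ _ _ hh, pv_pyGetD_last _ _ _ hl]
      rfl
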